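-- pv_equiv track=rewrite | github.com/ThomasParas/classifinder-engine | scripts/check_pattern_provenance.py | check_provenance
-- ===== SOURCE A (Python) =====
-- SOURCE_MARKERS = [
--     "# Source:",
--     "# Format",          # covers "# Format per", "# Format derived from", etc.
--     "# Pattern attribution:",
--     "# Independently",   # covers "# Independently authored", "# Independently derived"
--     "# Vendor-published",
--     "# Vendor format",
--     "# Common knowledge",
--     "# RFC ",
--     "# PCI",
-- ]
--
-- def check_provenance(filepath: str, content: str) -> list[tuple[int, str]]:
--     """Return list of (line_number, snippet) for re.compile() lines missing source comments."""
--     lines = content.splitlines()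
--     failures = []
--     for i, line in enumerate(lines):
--         if "re.compile(" in line and "# re.compile(" not in line:
--             window = lines[max(0, i - 5) : i]
--             has_source = any(
--                 any(marker in wline for marker in SOURCE_MARKERS)
--                 for wline in window
--             )
--             if not has_source:
--                 failures.append((i + 1, line.strip()))
--     return failures
-- ===== SOURCE B (Python) =====
-- SOURCE_MARKERS = [
--     "# Source:",
--     "# Format",
--     "# Pattern attribution:",
--     "# Independently",
--     "# Vendor-published",
--     "# Vendor format",
--     "# Common knowledge",
--     "# RFC ",
--     "# PCI",
-- ]
--
--
-- def check_provenance(filepath: str, content: str) -> list[tuple[int, str]]: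
--     """Single forward pass: track the index of the most recent marker line
--     instead of re-scanning a 5-line window for every re.compile() line."""
--     failures = []
--     last_marker = None
--     for i, line in enumerate(content.splitlines()):
--         if "re.compile(" in line and "# re.compile(" not in line:
--             if last_marker is None or i - last_marker > 5:
--                 failures.append((i + 1, line.strip()))
--         if any(marker in line for marker in SOURCE_MARKERS):
--             last_marker = i
--     return failures
-- ===== Notes on version B (the rewrite author's own statement) =====
-- stated objective: alternative
-- what changed: Replaces the per-compile-line backward scan of a 5-line window with a single forward pass that maintains the index of the most recent marker line, deciding each re.compile line from that running state.
import Mathlib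
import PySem

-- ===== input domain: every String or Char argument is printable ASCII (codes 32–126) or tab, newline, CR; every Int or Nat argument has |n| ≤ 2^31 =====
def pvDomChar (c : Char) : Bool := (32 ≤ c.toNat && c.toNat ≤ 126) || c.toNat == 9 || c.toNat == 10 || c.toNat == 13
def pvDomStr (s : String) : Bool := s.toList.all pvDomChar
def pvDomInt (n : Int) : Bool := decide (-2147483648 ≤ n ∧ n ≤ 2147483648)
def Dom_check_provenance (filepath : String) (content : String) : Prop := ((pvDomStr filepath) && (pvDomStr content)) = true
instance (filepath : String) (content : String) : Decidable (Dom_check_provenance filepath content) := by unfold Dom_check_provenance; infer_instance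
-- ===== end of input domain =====

-- B replaces A's per-line backward 5-line window scan by a single forward pass that
-- tracks the index of the most recent marker line (objective: alternative decomposition).

-- ===== PORT A =====
def pvSourceMarkers : List String :=
  ["# Source:", "# Format", "# Pattern attribution:", "# Independently",
   "# Vendor-published", "# Vendor format", "# Common knowledge", "# RFC ", "# PCI"]

-- any(marker in line for marker in SOURCE_MARKERS)
def pvHasMarker (line : String) : Bool :=
  pvSourceMarkers.any (fun marker => PySem.Str.isIn marker line)

-- loop body of A's 'for i, line in enumerate(lines)'
def pvABody (lines : List String) (failures : List (Int × String)) (p : Int × String) :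
    List (Int × String) :=
  if PySem.Str.isIn "re.compile(" p.2 && !(PySem.Str.isIn "# re.compile(" p.2) then
    let window := PySem.List.slice lines (some (max 0 (p.1 - 5))) (some p.1)
    let has_source := window.any (fun wline => pvHasMarker wline)
    if !has_source then failures ++ [(p.1 + 1, PySem.Str.strip p.2)] else failures
  else failures

def check_provenance (filepath : String) (content : String) : List (Int × String) :=
  let lines := PySem.Str.splitlines content
  (PySem.List.enumerate lines 0).foldl (pvABody lines) []

-- ===== PORT B =====
def pvBLoop (i : Int) (last : Option Int) (failures : List (Int × String)) :
    List String → List (Int × String)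
  | [] => failures
  | line :: rest =>
    let failures :=
      if PySem.Str.isIn "re.compile(" line && !(PySem.Str.isIn "# re.compile(" line) then
        if (match last with | none => true | some l => decide (i - l > 5)) then
          failures ++ [(i + 1, PySem.Str.strip line)]
        else failures
      else failures
    pvBLoop (i + 1) (if pvHasMarker line then some i else last) failures rest

def check_provenance_alt (filepath : String) (content : String) : List (Int × String) :=
  pvBLoop 0 none [] (PySem.Str.splitlines content)

-- ===== PRECONDITION & SPEC =====
def Spec_check_provenance (filepath : String) (content : String) (out : List (Int × String)) : Prop := out = check_provenance_alt filepath content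
instance (filepath : String) (content : String) (out : List (Int × String)) : Decidable (Spec_check_provenance filepath content out) := by unfold Spec_check_provenance; infer_instance

-- ===== CLAIM (what is proved, stated in full; the proofs are below) =====
def Claim_equal_check_provenance : Prop := ∀ (filepath : String) (content : String), Dom_check_provenance filepath content → Spec_check_provenance filepath content (check_provenance filepath content)

-- ===== LEMMAS AND PROOFS =====

/-- B's "no marker within 5 lines" test, as a function of the running state. -/
def pvNear (n : Int) (last : Option Int) : Bool :=
  match last with | none => false | some l => decide (n - l ≤ 5)

lemma pvNear_not (n : Int) (last : Option Int) :
    (!pvNear n last) = (match last with | none => true | some l => decide (n - l > 5)) := by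
  cases last with
  | none => rfl
  | some l =>
    simp only [pvNear]
    by_cases h : n - l ≤ 5
    · simp [h, show ¬ (5 < n - l) by omega]
    · simp [h, show 5 < n - l by omega]

/-- Invariant linking B's running state `last` to the processed prefix `pre`:
`last` is (the index of) the most recent marker line of `pre`, or `none`. -/
def pvInv (pre : List String) (last : Option Int) : Prop :=
  match last with
  | none => ∀ x ∈ pre, pvHasMarker x = false
  | some l => ∃ k : Nat, l = (k : Int) ∧ ∃ h : k < pre.length,
      pvHasMarker pre[k] = true ∧
      ∀ j (hj : j < pre.length), k < j → pvHasMarker pre[j] = false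

lemma pvInv_step (pre : List String) (last : Option Int) (line : String)
    (h : pvInv pre last) :
    pvInv (pre ++ [line]) (if pvHasMarker line then some (pre.length : Int) else last) := by
  by_cases hm : pvHasMarker line = true
  · simp only [hm, if_pos]
    exact ⟨pre.length, rfl, by simp, by simpa using hm, fun j hj hlt => by
      simp at hj; omega⟩
  · rw [Bool.not_eq_true] at hm
    simp only [hm, Bool.false_eq_true, if_false]
    cases last with
    | none =>
      intro x hx
      rcases List.mem_append.1 hx with h1 | h1
      · exact h x h1
      · simp at h1; subst h1; exact hm
    | some l =>
      obtain ⟨k, rfl, hk, hmk, hafter⟩ := h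
      refine ⟨k, rfl, ⟨by simp; omega, ?_, ?_⟩⟩
      · rwa [List.getElem_append_left hk]
      · intro j hj hlt
        simp at hj
        by_cases hj' : j < pre.length
        · rw [List.getElem_append_left hj']; exact hafter j hj' hlt
        · have hje : j = pre.length := by omega
          subst hje
          rw [List.getElem_concat_length rfl]; exact hm

/-- The 5-line window contains a marker iff the last marker is within 5 lines. -/
lemma pvWindow_any (pre : List String) (last : Option Int) (hInv : pvInv pre last) :
    (pre.drop (pre.length - 5)).any pvHasMarker = pvNear (pre.length : Int) last := by
  cases last with
  | none =>
    rw [List.any_eq_false.2 (fun x hx => by simp [hInv x (List.mem_of_mem_drop hx)])]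
    rfl
  | some l =>
    obtain ⟨k, rfl, hk, hmk, hafter⟩ := hInv
    by_cases hnear : pre.length - 5 ≤ k
    · have hj : k - (pre.length - 5) < (pre.drop (pre.length - 5)).length := by
        simp [List.length_drop]; omega
      have hmem : pre[k] ∈ pre.drop (pre.length - 5) := by
        rw [List.mem_iff_getElem]
        refine ⟨k - (pre.length - 5), hj, ?_⟩
        rw [List.getElem_drop]
        exact getElem_congr rfl (by omega) _
      rw [List.any_eq_true.2 ⟨pre[k], hmem, hmk⟩]
      have h5 : ((pre.length : Int) - k ≤ 5) := by omega
      simp [pvNear, h5]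
    · have hfalse : (pre.drop (pre.length - 5)).any pvHasMarker = false := by
        rw [List.any_eq_false]
        intro x hx
        obtain ⟨j, hj, hxe⟩ := List.getElem_of_mem hx
        rw [List.getElem_drop] at hxe
        subst hxe
        have hlt : pre.length - 5 + j < pre.length := by
          have := hj; simp [List.length_drop] at this; omega
        simp [hafter _ hlt (by omega)]
      rw [hfalse]
      have h5 : ¬ ((pre.length : Int) - k ≤ 5) := by omega
      simp [pvNear, h5]

lemma pvWindow_eq (pre rest : List String) :
    PySem.List.slice (pre ++ rest) (some (max 0 ((pre.length : Int) - 5))) (some (pre.length : Int))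
      = pre.drop (pre.length - 5) := by
  rw [PySem.List.slice_toNat _ (le_max_left _ _) (by positivity)]
  have h1 : (max 0 ((pre.length : Int) - 5)).toNat = pre.length - 5 := by omega
  have h2 : ((pre.length : Int)).toNat = pre.length := by omega
  rw [h1, h2, List.drop_append_of_le_length (by omega),
    List.take_append_of_le_length (by simp [List.length_drop])]
  have h3 : (pre.drop (pre.length - 5)).length ≤ pre.length - (pre.length - 5) := by
    simp [List.length_drop]
  exact List.take_of_length_le h3

lemma pvMain (lines : List String) :
    ∀ (rest pre : List String) (last : Option Int) (acc : List (Int × String)),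
      lines = pre ++ rest → pvInv pre last →
      (PySem.List.enumerate rest (pre.length : Int)).foldl (pvABody lines) acc
        = pvBLoop (pre.length : Int) last acc rest := by
  intro rest
  induction rest with
  | nil => intro pre last acc _ _; simp [PySem.List.enumerate, pvBLoop]
  | cons line rest ih =>
    intro pre last acc hlines hInv
    rw [PySem.List.enumerate_cons, List.foldl_cons]
    have hstep : pvABody lines acc ((pre.length : Int), line) =
        (if PySem.Str.isIn "re.compile(" line && !(PySem.Str.isIn "# re.compile(" line) then
          if (match last with | none => true | some l => decide ((pre.length : Int) - l > 5)) then
            acc ++ [((pre.length : Int) + 1, PySem.Str.strip line)]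
          else acc
        else acc) := by
      by_cases hc : (PySem.Str.isIn "re.compile(" line && !(PySem.Str.isIn "# re.compile(" line)) = true
      · simp only [pvABody, hc, if_pos]
        subst hlines
        rw [pvWindow_eq, pvWindow_any pre last hInv, pvNear_not]
      · simp only [pvABody]
        rw [if_neg hc, if_neg hc]
    rw [hstep]
    have hInv' := pvInv_step pre last line hInv
    have hlen : ((pre ++ [line]).length : Int) = (pre.length : Int) + 1 := by simp
    have hrec := ih (pre ++ [line]) (if pvHasMarker line then some (pre.length : Int) else last)
        (if PySem.Str.isIn "re.compile(" line && !(PySem.Str.isIn "# re.compile(" line) then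
          if (match last with | none => true | some l => decide ((pre.length : Int) - l > 5)) then
            acc ++ [((pre.length : Int) + 1, PySem.Str.strip line)]
          else acc
        else acc)
        (by rw [hlines, List.append_assoc]; rfl)
        hInv'
    rw [hlen] at hrec
    rw [hrec]
    rfl

-- ===== VERDICT (by name: the statement is the Claim_ definition above) =====
theorem check_provenance_spec : Claim_equal_check_provenance := by
  intro filepath content _
  unfold Spec_check_provenance check_provenance check_provenance_alt
  exact pvMain (PySem.Str.splitlines content) (PySem.Str.splitlines content) [] none []
    (by simp) (by intro x hx; simp at hx)
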